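-- pv_equiv track=rewrite | github.com/arom0808/mathlog_help | homework_2025_11_03.py | get_new_funcs
-- ===== SOURCE A (Python) =====
-- def upd_find_index(index, s):
--     if index == -1:
--         return len(s)
--     return index
--
-- def get_new_funcs(func):
--     index = 0
--     while True:
--         new_index = min([upd_find_index(func.find(arg, index), func) for arg in ["p", "q", "r"]])
--         if new_index >= len(func):
--             break
--         yield func[:new_index] + "f(p,q,r)" + func[new_index + 1:]
--         index = new_index + 1
-- ===== SOURCE B (Python) =====
-- def get_new_funcs(func):
--     for i, c in enumerate(func):
--         if c in ("p", "q", "r"):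
--             yield func[:i] + "f(p,q,r)" + func[i+1:]
-- ===== Notes on version B (the rewrite author's own statement) =====
-- stated objective: simpler
-- what changed: Replaces the while-loop cursor that repeatedly calls str.find for 'p','q','r' and takes the min of the three hits with a single enumerate pass that tests each character's membership once and yields the replacement at each matching index.
import Mathlib
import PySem

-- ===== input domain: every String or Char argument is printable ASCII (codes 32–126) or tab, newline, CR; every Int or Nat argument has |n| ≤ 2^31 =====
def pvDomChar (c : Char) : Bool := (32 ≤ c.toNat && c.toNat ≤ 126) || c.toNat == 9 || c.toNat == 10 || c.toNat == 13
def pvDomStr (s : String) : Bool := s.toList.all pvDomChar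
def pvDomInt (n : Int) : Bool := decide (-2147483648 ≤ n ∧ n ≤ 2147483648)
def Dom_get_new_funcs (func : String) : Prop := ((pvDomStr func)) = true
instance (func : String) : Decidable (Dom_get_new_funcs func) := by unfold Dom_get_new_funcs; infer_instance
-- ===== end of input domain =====

-- B replaces A's while/cursor machinery (three str.find calls + min per step) with a single
-- enumerate pass testing each character once; objective: simpler, same results (A and B are generators;
-- equivalence is about the produced sequence, as a list).

-- ===== PORT A =====
def updFindIndexA (index : Int) (s : String) : Int :=
  if index = -1 then PySem.Str.len s else index

-- the 'new_index = min([upd_find_index(func.find(arg, index), func) for arg in ["p","q","r"]])' expression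
def newIndexA (func : String) (index : Int) : Int :=
  (PySem.List.min? (["p", "q", "r"].map
      (fun arg => updFindIndexA (PySem.Str.findFrom func arg index) func)) (fun x => x)).getD 0

-- the 'while True' loop; fuel = len(func)+1 iterations always suffice since index strictly increases
def getNewFuncsLoopA (func : String) : Nat → Int → List String
  | 0, _ => []
  | fuel + 1, index =>
    if newIndexA func index ≥ PySem.Str.len func then []
    else (PySem.Str.slice func none (some (newIndexA func index)) ++ "f(p,q,r)"
            ++ PySem.Str.slice func (some (newIndexA func index + 1)) none)
         :: getNewFuncsLoopA func fuel (newIndexA func index + 1)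

def get_new_funcs (func : String) : List String :=
  getNewFuncsLoopA func (func.toList.length + 1) 0

-- ===== PORT B =====
def get_new_funcs_alt (func : String) : List String :=
  (PySem.List.enumerate func.toList 0).foldl
    (fun acc ic =>
      if ic.2 == 'p' || ic.2 == 'q' || ic.2 == 'r' then
        acc ++ [PySem.Str.slice func none (some ic.1) ++ "f(p,q,r)"
                  ++ PySem.Str.slice func (some (ic.1 + 1)) none]
      else acc) []

-- ===== PRECONDITION & SPEC =====
def Spec_get_new_funcs (func : String) (out : List String) : Prop := out = get_new_funcs_alt func
instance (func : String) (out : List String) : Decidable (Spec_get_new_funcs func out) := by unfold Spec_get_new_funcs; infer_instance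

-- ===== CLAIM (what is proved, stated in full; the proofs are below) =====
def Claim_equal_get_new_funcs : Prop := ∀ (func : String), Dom_get_new_funcs func → Spec_get_new_funcs func (get_new_funcs func)

-- ===== LEMMAS AND PROOFS =====

def isPQR (c : Char) : Bool := c == 'p' || c == 'q' || c == 'r'

-- index of the first character satisfying p, or t.length if none
def firstIdx (p : Char → Bool) : List Char → Nat
  | [] => 0
  | c :: t => if p c then 0 else firstIdx p t + 1

def replS (func : String) (i : Int) : String :=
  PySem.Str.slice func none (some i) ++ "f(p,q,r)" ++ PySem.Str.slice func (some (i + 1)) none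

-- what B emits when started at position k
def emitsB (func : String) (k : Nat) : List String :=
  ((PySem.List.enumerate (func.toList.drop k) (k : Int)).filter (fun ic => isPQR ic.2)).map
    (fun ic => replS func ic.1)

theorem alt_eq_emitsB (func : String) : get_new_funcs_alt func = emitsB func 0 := by
  unfold get_new_funcs_alt emitsB
  simp only [PySem.List.foldl_append_if, List.nil_append, List.drop_zero, Nat.cast_zero]
  simp [isPQR, replS]

theorem firstIdx_le (p : Char → Bool) (t : List Char) : firstIdx p t ≤ t.length := by
  induction t with
  | nil => simp [firstIdx]
  | cons c t ih => simp only [firstIdx, List.length_cons]; split <;> omega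

theorem firstIdx_eq_length_iff (p : Char → Bool) (t : List Char) :
    firstIdx p t = t.length ↔ ∀ c ∈ t, p c = false := by
  induction t with
  | nil => simp [firstIdx]
  | cons c t ih =>
    have hle := firstIdx_le p t
    cases h : p c with
    | true =>
      simp only [firstIdx, h, if_true, List.length_cons, List.mem_cons]
      constructor
      · intro he; exact absurd he (by omega)
      · intro hall
        have := hall c (Or.inl rfl)
        simp [h] at this
    | false =>
      simp only [firstIdx, h, Bool.false_eq_true, if_false, List.length_cons, List.mem_cons]
      constructor
      · intro he x hx
        rcases hx with rfl | hx
        · exact h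
        · exact (ih.mp (by omega)) x hx
      · intro hall
        have := ih.mpr (fun x hx => hall x (Or.inr hx))
        omega

theorem firstIdx_single_eq (c : Char) : ∀ (t : List Char) (m : Nat),
    [c] <+: t.drop m → (∀ i < m, ¬ [c] <+: t.drop i) →
    firstIdx (fun x => x == c) t = m := by
  intro t
  induction t with
  | nil =>
    intro m hpre _
    simp at hpre
  | cons a t ih =>
    intro m hpre hmin
    cases m with
    | zero =>
      simp only [List.drop_zero] at hpre
      rcases (List.cons_prefix_cons.mp hpre) with ⟨rfl, -⟩
      simp [firstIdx]
    | succ m =>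
      have ha : ¬ [c] <+: (a :: t) := by simpa using hmin 0 (by omega)
      have hac : (a == c) = false := by
        by_contra hb
        have : a = c := by simpa using hb
        subst this
        exact ha ⟨t, rfl⟩
      simp only [firstIdx, hac, Bool.false_eq_true, if_false]
      have := ih m (by simpa using hpre) (fun i hi => by simpa using hmin (i + 1) (by omega))
      omega

theorem firstIdx_single_eq_length (c : Char) (t : List Char) (h : ¬ [c] <:+: t) :
    firstIdx (fun x => x == c) t = t.length := by
  apply (firstIdx_eq_length_iff _ _).mpr
  intro x hx
  by_contra hb
  have : x = c := by simpa using hb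
  subst this
  obtain ⟨l1, l2, rfl⟩ := List.append_of_mem hx
  exact h ⟨l1, l2, by simp⟩

theorem min?_three (a b c : Int) :
    PySem.List.min? [a, b, c] (fun x => x) = some (min (min a b) c) := by
  simp only [PySem.List.min?, List.foldl, min_def]
  by_cases h1 : b < a <;> simp only [h1, if_true, if_false] <;> split_ifs <;> simp <;> omega

theorem min3_firstIdx (t : List Char) :
    min (min (firstIdx (fun x => x == 'p') t) (firstIdx (fun x => x == 'q') t))
        (firstIdx (fun x => x == 'r') t) = firstIdx isPQR t := by
  induction t with
  | nil => simp [firstIdx]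
  | cons a t ih =>
    simp only [firstIdx, isPQR]
    rcases Bool.eq_false_or_eq_true (a == 'p') with hp | hp <;>
      rcases Bool.eq_false_or_eq_true (a == 'q') with hq | hq <;>
        rcases Bool.eq_false_or_eq_true (a == 'r') with hr | hr <;>
          simp only [hp, hq, hr, Bool.or_true, Bool.or_false, if_true, Bool.false_eq_true, if_false] <;> omega

-- the updated find of a single character, started at k, equals k + firstIdx of the suffix
theorem updFind_eq (func : String) (c : Char) (k : Nat) (hk : k ≤ func.toList.length) :
    updFindIndexA (PySem.Chars.findFrom func.toList [c] (k : Int) none) func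
      = ((k + firstIdx (fun x => x == c) (func.toList.drop k) : Nat) : Int) := by
  rw [PySem.Chars.findFrom_natCast func.toList [c] k hk]
  by_cases hfind : PySem.Chars.find (func.toList.drop k) [c] = -1
  · have hlen : firstIdx (fun x => x == c) (func.toList.drop k) = (func.toList.drop k).length :=
      firstIdx_single_eq_length c _ ((PySem.Chars.find_eq_neg_one_iff _ _).mp hfind)
    simp only [hfind, if_true, updFindIndexA, PySem.Str.len_eq, hlen,
      List.length_drop]
    push_cast
    omega
  · have h0 : 0 ≤ PySem.Chars.find (func.toList.drop k) [c] := by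
      have := PySem.Chars.neg_one_le_find (func.toList.drop k) [c]
      omega
    obtain ⟨hpre, hmin⟩ := PySem.Chars.find_spec h0
    have hfi : firstIdx (fun x => x == c) (func.toList.drop k)
        = (PySem.Chars.find (func.toList.drop k) [c]).toNat :=
      firstIdx_single_eq c _ _ hpre hmin
    have hne : ¬ ((k : Int) + PySem.Chars.find (func.toList.drop k) [c] = -1) := by omega
    simp only [hfind, if_false, updFindIndexA, if_neg hne, hfi]
    push_cast
    omega

theorem newIndexA_eq (func : String) (k : Nat) (hk : k ≤ func.toList.length) :
    newIndexA func (k : Int) = ((k + firstIdx isPQR (func.toList.drop k) : Nat) : Int) := by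
  unfold newIndexA
  have hp : ("p" : String).toList = ['p'] := rfl
  have hq : ("q" : String).toList = ['q'] := rfl
  have hr : ("r" : String).toList = ['r'] := rfl
  simp only [List.map, PySem.Str.findFrom_eq, hp, hq, hr,
    updFind_eq func 'p' k hk, updFind_eq func 'q' k hk, updFind_eq func 'r' k hk,
    min?_three, Option.getD_some]
  have := min3_firstIdx (func.toList.drop k)
  push_cast [← this]
  omega

theorem emitsB_nil_of_none (func : String) (k : Nat)
    (h : ∀ c ∈ func.toList.drop k, isPQR c = false) : emitsB func k = [] := by
  unfold emitsB
  rw [List.filter_eq_nil_iff.mpr, List.map_nil]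
  intro ic hic
  obtain ⟨j, hj, rfl⟩ := (PySem.List.mem_enumerate_iff _ _ _).mp hic
  simpa using h _ (List.getElem_mem hj)

theorem emitsB_succ (func : String) (k : Nat) (hk : k < func.toList.length) :
    emitsB func k
      = (if isPQR (func.toList[k]) then [replS func ((k : Nat) : Int)] else [])
        ++ emitsB func (k + 1) := by
  unfold emitsB
  rw [List.drop_eq_getElem_cons hk, PySem.List.enumerate_cons]
  have : ((k : Int) + 1) = ((k + 1 : Nat) : Int) := by push_cast; ring
  rw [this]
  by_cases h : isPQR (func.toList[k]) <;> simp [h]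

theorem emitsB_split (func : String) : ∀ (j k : Nat),
    firstIdx isPQR (func.toList.drop k) = j → k + j < func.toList.length →
    emitsB func k = replS func ((k + j : Nat) : Int) :: emitsB func (k + j + 1) := by
  intro j
  induction j with
  | zero =>
    intro k hfi hlt
    have hk : k < func.toList.length := by omega
    have hhit : isPQR (func.toList[k]) = true := by
      have := List.drop_eq_getElem_cons hk
      rw [this] at hfi
      by_contra hb
      simp only [firstIdx, Bool.not_eq_true] at hfi hb
      rw [if_neg (by simp [hb])] at hfi
      omega
    have := emitsB_succ func k hk
    rw [if_pos hhit] at this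
    simpa using this
  | succ j ih =>
    intro k hfi hlt
    have hk : k < func.toList.length := by omega
    have hdrop := List.drop_eq_getElem_cons hk
    rw [hdrop] at hfi
    have hmiss : isPQR (func.toList[k]) = false := by
      by_contra hb
      simp only [Bool.not_eq_false] at hb
      simp [firstIdx, hb] at hfi
    simp only [firstIdx, hmiss] at hfi
    have hrec := ih (k + 1) (by simpa using hfi) (by omega)
    have := emitsB_succ func k hk
    rw [if_neg (by simp [hmiss])] at this
    rw [this, hrec]
    have e1 : k + 1 + j = k + (j + 1) := by omega
    rw [e1, List.nil_append]

theorem loopA_succ (func : String) (fuel : Nat) (index : Int) :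
    getNewFuncsLoopA func (fuel + 1) index
      = if newIndexA func index ≥ PySem.Str.len func then []
        else (PySem.Str.slice func none (some (newIndexA func index)) ++ "f(p,q,r)"
                ++ PySem.Str.slice func (some (newIndexA func index + 1)) none)
             :: getNewFuncsLoopA func fuel (newIndexA func index + 1) := rfl

theorem loop_eq_emitsB (func : String) : ∀ (fuel k : Nat),
    k ≤ func.toList.length → func.toList.length - k < fuel →
    getNewFuncsLoopA func fuel (k : Int) = emitsB func k := by
  intro fuel
  induction fuel with
  | zero => intro k hk hf; omega
  | succ fuel ih =>
    intro k hk hf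
    have hni := newIndexA_eq func k hk
    have hle := firstIdx_le isPQR (func.toList.drop k)
    rw [List.length_drop] at hle
    set j := firstIdx isPQR (func.toList.drop k) with hj
    rw [loopA_succ, hni, PySem.Str.len_eq]
    by_cases hbig : ((k + j : Nat) : Int) ≥ (func.toList.length : Int)
    · rw [if_pos hbig]
      have hbig' : func.toList.length ≤ k + j := by exact_mod_cast hbig
      have hflen : firstIdx isPQR (func.toList.drop k) = (func.toList.drop k).length := by
        rw [← hj, List.length_drop]; omega
      exact (emitsB_nil_of_none func k ((firstIdx_eq_length_iff _ _).mp hflen)).symm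
    · rw [if_neg hbig]
      have hlt : k + j < func.toList.length := by
        have : ¬ (func.toList.length ≤ k + j) := fun h => hbig (by exact_mod_cast h)
        omega
      rw [emitsB_split func j k hj.symm hlt]
      have hcast : ((k + j : Nat) : Int) + 1 = ((k + j + 1 : Nat) : Int) := by push_cast; ring
      rw [hcast, ih (k + j + 1) (by omega) (by omega)]
      rfl

-- ===== VERDICT (by name: the statement is the Claim_ definition above) =====
theorem get_new_funcs_spec : Claim_equal_get_new_funcs := by
  intro func _
  unfold Spec_get_new_funcs get_new_funcs
  rw [alt_eq_emitsB]
  have := loop_eq_emitsB func (func.toList.length + 1) 0 (by omega) (by omega)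
  simpa using this
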